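-- pv_equiv track=rewrite | github.com/nikuframedia-svg/Moldit- | apps/backend/src/domain/solver/bridge.py | _build_workday_ranks
-- ===== SOURCE A (Python) =====
-- def _build_workday_ranks(workdays: list[bool]) -> list[int]:
--     """Map calendar day index → workday rank (0-based).
--
--     Non-workdays get the rank of the previous workday (or 0).
--     """
--     ranks: list[int] = []
--     rank = -1
--     for wd in workdays:
--         if wd:
--             rank += 1
--         ranks.append(max(rank, 0))
--     return ranks
-- ===== SOURCE B (Python) =====
-- def _build_workday_ranks(workdays: list[bool]) -> list[int]:
--     n = len(workdays)
--     pos = [i for i, wd in enumerate(workdays) if wd]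
--     if not pos:
--         return [0] * n
--     out = [0] * pos[0]
--     for k, p in enumerate(pos):
--         end = pos[k + 1] if k + 1 < len(pos) else n
--         out.extend([k] * (end - p))
--     return out
-- ===== Notes on version B (the rewrite author's own statement) =====
-- stated objective: alternative
-- what changed: Instead of a per-day stateful scan, B first gathers the index positions of the workdays and then emits the answer as constant-valued runs, one run per inter-workday segment (plus a leading zero run).
import Mathlib
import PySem

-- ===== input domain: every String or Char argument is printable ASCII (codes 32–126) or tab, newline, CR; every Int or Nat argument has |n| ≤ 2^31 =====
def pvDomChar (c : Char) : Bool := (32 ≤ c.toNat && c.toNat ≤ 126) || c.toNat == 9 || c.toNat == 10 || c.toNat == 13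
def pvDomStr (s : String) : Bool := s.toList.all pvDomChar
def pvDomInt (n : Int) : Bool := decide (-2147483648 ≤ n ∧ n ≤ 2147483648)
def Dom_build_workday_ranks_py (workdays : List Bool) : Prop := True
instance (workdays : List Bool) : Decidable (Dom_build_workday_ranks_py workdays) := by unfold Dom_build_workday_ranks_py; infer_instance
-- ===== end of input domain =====

-- B gathers the workday index positions first and then emits the result as constant runs,
-- one run per inter-workday segment, instead of A's per-day stateful scan (alternative, same cost).
-- ===== PORT A =====
def build_workday_ranks_py (workdays : List Bool) : List Int :=
  (workdays.foldl (fun (st : List Int × Int) wd =>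
      let rank := if wd then st.2 + 1 else st.2
      (st.1 ++ [max rank 0], rank)) ([], -1)).1

-- ===== PORT B =====
-- [i for i, wd in enumerate(workdays) if wd], transliterated with an explicit index
def pvPositions : List Bool → Int → List Int
  | [], _ => []
  | wd :: t, i => if wd then i :: pvPositions t (i + 1) else pvPositions t (i + 1)

-- the 'for k, p in enumerate(pos): out.extend([k] * (end - p))' loop
def pvEmitRuns : List Int → Int → Int → List Int
  | [], _, _ => []
  | p :: rest, n, k =>
      let e := match rest with | [] => n | q :: _ => q
      List.replicate (e - p).toNat k ++ pvEmitRuns rest n (k + 1)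

def build_workday_ranks_py_alt (workdays : List Bool) : List Int :=
  let n : Int := workdays.length
  match pvPositions workdays 0 with
  | [] => List.replicate workdays.length 0
  | p :: ps => List.replicate p.toNat 0 ++ pvEmitRuns (p :: ps) n 0

-- ===== PRECONDITION & SPEC =====
def Spec_build_workday_ranks_py (workdays : List Bool) (out : List Int) : Prop := out = build_workday_ranks_py_alt workdays
instance (workdays : List Bool) (out : List Int) : Decidable (Spec_build_workday_ranks_py workdays out) := by unfold Spec_build_workday_ranks_py; infer_instance

-- ===== CLAIM (what is proved, stated in full; the proofs are below) =====
def Claim_equal_build_workday_ranks_py : Prop := ∀ (workdays : List Bool), Dom_build_workday_ranks_py workdays → Spec_build_workday_ranks_py workdays (build_workday_ranks_py workdays)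

-- ===== LEMMAS AND PROOFS =====
-- reference recursion: emit max(rank,0) per day, threading the rank
def pvRef : List Bool → Int → List Int
  | [], _ => []
  | wd :: t, r =>
      let r' := if wd then r + 1 else r
      max r' 0 :: pvRef t r'

lemma pv_foldA (l : List Bool) (acc : List Int) (r : Int) :
    (l.foldl (fun (st : List Int × Int) wd =>
        let rank := if wd then st.2 + 1 else st.2
        (st.1 ++ [max rank 0], rank)) (acc, r)).1 = acc ++ pvRef l r := by
  induction l generalizing acc r with
  | nil => simp [pvRef]
  | cons wd t ih =>
      cases wd with
      | false =>
          simpa [List.foldl, pvRef, List.append_assoc] using ih (acc ++ [max r 0]) r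
      | true =>
          simpa [List.foldl, pvRef, List.append_assoc] using ih (acc ++ [max (r + 1) 0]) (r + 1)

lemma pvPositions_ge : ∀ (t : List Bool) (j q : Int), q ∈ pvPositions t j → j ≤ q := by
  intro t
  induction t with
  | nil => intro j q h; simp [pvPositions] at h
  | cons wd t ih =>
      intro j q h
      simp only [pvPositions] at h
      split_ifs at h with hw
      · rcases List.mem_cons.mp h with h | h
        · omega
        · have := ih (j + 1) q h; omega
      · have := ih (j + 1) q h; omega

lemma pv_emit_eq : ∀ (t : List Bool) (i k : Int), 0 ≤ k →
    pvEmitRuns (i :: pvPositions t (i + 1)) (i + 1 + t.length) k = k :: pvRef t k := by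
  intro t
  induction t with
  | nil =>
      intro i k hk
      have h1 : (i + 1 + (([] : List Bool).length : Int) - i).toNat = 1 := by simp
      simp [pvPositions, pvEmitRuns, pvRef]
  | cons wd t ih =>
      intro i k hk
      cases wd with
      | true =>
          have hn : i + 1 + ((true :: t).length : Int) = i + 1 + 1 + t.length := by
            simp; omega
          have hm : max (k + 1) 0 = k + 1 := by omega
          have key := ih (i + 1) (k + 1) (by omega)
          simp only [pvEmitRuns] at key
          simp only [pvPositions, reduceIte, pvEmitRuns, hn]
          rw [key]
          simp [pvRef, hm]
      | false =>
          -- head of the position list stays i; the first run gets one element longer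
          have hn : i + 1 + ((false :: t).length : Int) = i + 1 + 1 + t.length := by
            simp; omega
          have hm : max k 0 = k := by omega
          have key := ih (i + 1) k hk
          cases hp : pvPositions t (i + 1 + 1) with
          | nil =>
              have hlen : (i + 1 + 1 + (t.length : Int) - i).toNat
                  = (i + 1 + 1 + (t.length : Int) - (i + 1)).toNat + 1 := by omega
              simp only [pvPositions, Bool.false_eq_true, reduceIte, hp, pvEmitRuns, hn] at key ⊢
              rw [hlen, List.replicate_succ]
              simp only [List.cons_append, key]
              simp [pvRef, hm]
          | cons q qs =>
              have hq : i + 1 + 1 ≤ q := pvPositions_ge t (i + 1 + 1) q (by rw [hp]; simp)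
              have hlen : (q - i).toNat = (q - (i + 1)).toNat + 1 := by omega
              simp only [pvPositions, Bool.false_eq_true, reduceIte, hp, pvEmitRuns, hn] at key ⊢
              rw [hlen, List.replicate_succ]
              simp only [List.cons_append, key]
              simp [pvRef, hm]

lemma pv_top : ∀ (l : List Bool) (i : Int),
    (pvPositions l i = [] → pvRef l (-1) = List.replicate l.length 0) ∧
    (∀ p ps, pvPositions l i = p :: ps →
      pvRef l (-1) = List.replicate (p - i).toNat 0 ++ pvEmitRuns (p :: ps) (i + l.length) 0) := by
  intro l
  induction l with
  | nil =>
      intro i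
      refine ⟨fun _ => by simp [pvRef], fun p ps h => by simp [pvPositions] at h⟩
  | cons wd t ih =>
      intro i
      cases wd with
      | true =>
          refine ⟨fun h => by simp [pvPositions] at h, fun p ps h => ?_⟩
          simp only [pvPositions, reduceIte, List.cons.injEq] at h
          obtain ⟨hp, hps⟩ := h
          subst hp; subst hps
          have hn : i + ((true :: t).length : Int) = i + 1 + t.length := by simp; omega
          rw [hn, pv_emit_eq t i 0 (by omega)]
          simp [pvRef]
      | false =>
          constructor
          · intro h
            simp only [pvPositions, Bool.false_eq_true, reduceIte] at h
            have := (ih (i + 1)).1 h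
            simp [pvRef, this, List.replicate_succ]
          · intro p ps h
            simp only [pvPositions, Bool.false_eq_true, reduceIte] at h
            have hrec := (ih (i + 1)).2 p ps h
            have hq : i + 1 ≤ p := pvPositions_ge t (i + 1) p (by rw [h]; simp)
            have hlen : (p - i).toNat = (p - (i + 1)).toNat + 1 := by omega
            have hn : i + ((false :: t).length : Int) = i + 1 + t.length := by simp; omega
            rw [hn, hlen, List.replicate_succ]
            simp [pvRef, hrec]

-- ===== VERDICT (by name: the statement is the Claim_ definition above) =====
theorem build_workday_ranks_py_spec : Claim_equal_build_workday_ranks_py := by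
  intro workdays _
  unfold Spec_build_workday_ranks_py build_workday_ranks_py build_workday_ranks_py_alt
  rw [pv_foldA workdays [] (-1), List.nil_append]
  cases h : pvPositions workdays 0 with
  | nil => exact (pv_top workdays 0).1 h
  | cons p ps =>
      have := (pv_top workdays 0).2 p ps h
      have hp0 : 0 ≤ p := pvPositions_ge workdays 0 p (by rw [h]; simp)
      simpa [Int.sub_zero] using this
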